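-- pv_equiv track=rewrite | github.com/pypi-data/pypi-mirror-383 | packages/asodesigner/asodesigner-1.1.8.tar.gz/asodesigner-1.1.8/src/asodesigner/algorithms/suffix_array.py | build_suffix_array_ManberMyers
-- ===== SOURCE A (Python) =====
-- from collections import defaultdict
--
-- def build_suffix_array_ManberMyers(string):
--     result = []
--
--     def sort_bucket(string, bucket, order=1):
--         d = defaultdict(list)
--         for i in bucket:
--             key = string[i:i + order]
--             d[key].append(i)
--         for k, v in sorted(d.items()):
--             if len(v) > 1:
--                 sort_bucket(string, v, order * 2)
--             else:
--                 result.append(v[0])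
--         return result
--
--     return sort_bucket(string, (i for i in range(len(string))))
-- ===== SOURCE B (Python) =====
-- def build_suffix_array_ManberMyers(string):
--     return sorted(range(len(string)), key=lambda i: string[i:])
-- ===== Notes on version B (the rewrite author's own statement) =====
-- stated objective: simpler
-- what changed: A's recursive Manber-Myers bucket sort (group indices by width-`order` prefix into a dict, sort the buckets by key, recurse with doubled width on ties) is replaced by a single library sort of the indices keyed by the full suffix.
import Mathlib
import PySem

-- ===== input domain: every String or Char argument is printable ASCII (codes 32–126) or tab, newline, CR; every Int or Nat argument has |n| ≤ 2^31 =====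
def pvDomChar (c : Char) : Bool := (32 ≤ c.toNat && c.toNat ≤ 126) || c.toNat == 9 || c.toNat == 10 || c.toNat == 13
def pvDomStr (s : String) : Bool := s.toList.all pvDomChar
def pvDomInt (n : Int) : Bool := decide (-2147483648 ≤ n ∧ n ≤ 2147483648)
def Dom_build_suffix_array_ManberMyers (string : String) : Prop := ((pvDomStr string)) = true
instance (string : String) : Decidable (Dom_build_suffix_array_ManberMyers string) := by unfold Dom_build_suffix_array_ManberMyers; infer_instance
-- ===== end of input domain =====

-- B replaces A's recursive prefix-doubling bucket sort by one library sort of the indices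
-- keyed by the full suffix (objective: simpler).

-- ===== PORT A =====
-- sort_bucket, with a fuel guard that only makes the recursion total (proved never
-- exhausted for the fuel passed below).  Python's sorted(d.items()) compares (key, value)
-- tuples, but the dict's keys are distinct, so it equals sorting by the key alone,
-- which is how it is ported (kv.1).  v[0] is ported as pyGetD kv.2 0 0; the bucket
-- lists stored in d are provably nonempty, so the default is never used.
def pvSortBucket (cs : List Char) (fuel : Nat) (bucket : List Int) (order : Int)
    (result : List Int) : List Int :=
  match fuel with
  | 0 => result
  | f + 1 =>
    let d : PySem.Dict (List Char) (List Int) :=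
      bucket.foldl (fun d i =>
        d.modify (PySem.List.slice cs (some i) (some (i + order))) [] (fun v => v ++ [i]))
        PySem.Dict.empty
    (PySem.List.sorted d.items (fun kv => kv.1) false).foldl
      (fun result kv =>
        if kv.2.length > 1 then pvSortBucket cs f kv.2 (order * 2) result
        else result ++ [PySem.List.pyGetD kv.2 0 0]) result

def build_suffix_array_ManberMyers (string : String) : List Int :=
  pvSortBucket string.toList (string.toList.length + 2)
    (PySem.List.pyRange 0 (PySem.Str.len string) 1) 1 []

-- ===== PORT B =====
def build_suffix_array_ManberMyers_alt (string : String) : List Int :=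
  PySem.List.sorted (PySem.List.pyRange 0 (PySem.Str.len string) 1)
    (fun i => PySem.List.slice string.toList (some i) none) false

-- ===== PRECONDITION & SPEC =====
def Spec_build_suffix_array_ManberMyers (string : String) (out : List Int) : Prop := out = build_suffix_array_ManberMyers_alt string
instance (string : String) (out : List Int) : Decidable (Spec_build_suffix_array_ManberMyers string out) := by unfold Spec_build_suffix_array_ManberMyers; infer_instance

-- ===== CLAIM (what is proved, stated in full; the proofs are below) =====
def Claim_equal_build_suffix_array_ManberMyers : Prop := ∀ (string : String), Dom_build_suffix_array_ManberMyers string → Spec_build_suffix_array_ManberMyers string (build_suffix_array_ManberMyers string)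

-- ===== LEMMAS AND PROOFS =====

-- the key of index i at width `order`, and the bucket of indices sharing key k
def pvKey (cs : List Char) (order i : Int) : List Char :=
  PySem.List.slice cs (some i) (some (i + order))
def pvGrp (cs : List Char) (order : Int) (bucket : List Int) (k : List Char) : List Int :=
  bucket.filter (fun i => pvKey cs order i == k)

lemma pvKey_eq_take (cs : List Char) (order i : Int) (hi : 0 ≤ i) (ho : 0 ≤ order) :
    pvKey cs order i = (cs.drop i.toNat).take order.toNat := by
  unfold pvKey
  rw [PySem.List.slice_toNat _ hi (by omega)]
  congr 1
  omega

-- lexicographic comparison of equal-width prefixes decides the full comparison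
lemma pv_take_lt (m : Nat) : ∀ (u v : List Char), u.take m < v.take m → u < v := by
  induction m with
  | zero => intro u v h; simp at h
  | succ m ih =>
    intro u v h
    match u, v with
    | [], [] => simp at h
    | [], b :: v => exact List.nil_lt_cons _ _
    | a :: u, [] => simp at h
    | a :: u, b :: v =>
      simp only [List.take_succ_cons, List.cons_lt_cons_iff] at h ⊢
      rcases h with h | ⟨rfl, h⟩
      · exact Or.inl h
      · exact Or.inr ⟨rfl, ih _ _ h⟩

-- two distinct (in-range) suffixes of cs are distinct lists
lemma pv_suffix_ne (cs : List Char) (a b : Int) (ha0 : 0 ≤ a) (ha : a.toNat < cs.length)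
    (hb0 : 0 ≤ b) (hb : b.toNat < cs.length) (hne : a ≠ b) :
    cs.drop a.toNat ≠ cs.drop b.toNat := by
  intro h
  have := congrArg List.length h
  simp [List.length_drop] at this
  omega

-- sorted does not depend on the choice of the DecidableLT instance
lemma pv_sorted_congr {α κ : Type} [LT κ] (d1 d2 : DecidableLT κ) (xs : List α)
    (key : α → κ) (rev : Bool) :
    @PySem.List.sorted α κ _ d1 xs key rev = @PySem.List.sorted α κ _ d2 xs key rev := by
  congr 1

-- the dict built by the first loop: one entry per distinct key (first-occurrence order),
-- holding the indices with that key in bucket order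
lemma pv_dict_items (cs : List Char) (order : Int) (bucket : List Int) :
    (bucket.foldl (fun d i =>
        d.modify (PySem.List.slice cs (some i) (some (i + order))) [] (fun v => v ++ [i]))
        (PySem.Dict.empty : PySem.Dict (List Char) (List Int))).items
      = (PySem.Set.ofList (bucket.map (pvKey cs order))).map
          (fun k => (k, pvGrp cs order bucket k)) := by
  have hkeys : (bucket.foldl (fun d i =>
        d.modify (PySem.List.slice cs (some i) (some (i + order))) [] (fun v => v ++ [i]))
        (PySem.Dict.empty : PySem.Dict (List Char) (List Int))).keys
      = PySem.Set.ofList (bucket.map (pvKey cs order)) := by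
    have := PySem.Dict.keys_foldl_modify_key bucket (pvKey cs order) ([] : List Int)
      (fun _ i v => v ++ [i]) (PySem.Dict.empty : PySem.Dict (List Char) (List Int))
    simpa [pvKey] using this
  have hnd : (bucket.foldl (fun d i =>
        d.modify (PySem.List.slice cs (some i) (some (i + order))) [] (fun v => v ++ [i]))
        (PySem.Dict.empty : PySem.Dict (List Char) (List Int))).keys.Nodup := by
    have := PySem.Dict.nodup_keys_foldl_modify_key bucket (pvKey cs order) ([] : List Int)
      (fun _ i v => v ++ [i]) (PySem.Dict.empty : PySem.Dict (List Char) (List Int)) (by simp)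
    simpa [pvKey] using this
  rw [PySem.Dict.items_eq_map_keys _ hnd ([] : List Int), hkeys]
  apply List.map_congr_left
  intro k hk
  congr 1
  have hfold : (bucket.foldl (fun d i =>
        d.modify (PySem.List.slice cs (some i) (some (i + order))) [] (fun v => v ++ [i]))
        (PySem.Dict.empty : PySem.Dict (List Char) (List Int)))
      = ((bucket.map (fun i => (pvKey cs order i, i))).foldl
          (fun d p => d.modify p.1 [] (fun v => v ++ [p.2]))
          (PySem.Dict.empty : PySem.Dict (List Char) (List Int))) := by
    rw [List.foldl_map]
    rfl
  rw [hfold, PySem.Dict.getD_foldl_modify_append]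
  simp [pvGrp, List.filter_map, Function.comp_def]

-- sorting the items by the key component = mapping over the sorted key list
lemma pv_sorted_items (cs : List Char) (order : Int) (bucket : List Int) :
    @PySem.List.sorted _ (List Char) _ LinearOrder.toDecidableLT
        ((PySem.Set.ofList (bucket.map (pvKey cs order))).map
          (fun k => (k, pvGrp cs order bucket k))) (fun kv => kv.1) false
      = (@PySem.List.sorted _ (List Char) _ LinearOrder.toDecidableLT
          (PySem.Set.ofList (bucket.map (pvKey cs order)))
          (fun k => k) false).map (fun k => (k, pvGrp cs order bucket k)) := by
  exact PySem.List.sorted_eq_of_perm_of_pairwise_lt _ _ _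
    ((@PySem.List.sorted_perm _ _ _ LinearOrder.toDecidableLT _ _ _).map _)
    (List.Pairwise.map _ (fun _ _ h => h)
      (PySem.List.sorted_ofList_pairwise_lt (xs := bucket.map (pvKey cs order))))

-- concatenating the buckets of any duplicate-free list of keys covering bucket
-- is a permutation of bucket
lemma pv_flatMap_perm (K : Int → List Char) :
    ∀ (ks : List (List Char)) (bucket : List Int), ks.Nodup →
      (∀ i ∈ bucket, K i ∈ ks) →
      (ks.flatMap (fun k => bucket.filter (fun i => K i == k))).Perm bucket := by
  intro ks
  induction ks with
  | nil =>
    intro bucket _ hcov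
    have : bucket = [] := by
      cases bucket with
      | nil => rfl
      | cons x xs => exact absurd (hcov x (by simp)) (by simp)
    simp [this]
  | cons k ks ih =>
    intro bucket hnd hcov
    simp only [List.flatMap_cons]
    have hks : ks.Nodup := hnd.of_cons
    have hkn : k ∉ ks := by simp [List.nodup_cons] at hnd; exact hnd.1
    have hmap : ks.flatMap (fun k' => bucket.filter (fun i => K i == k'))
        = ks.flatMap (fun k' => (bucket.filter (fun i => !(K i == k))).filter
            (fun i => K i == k')) := by
      apply List.flatMap_congr
      intro k' hk'
      rw [List.filter_filter]
      apply List.filter_congr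
      intro i _
      by_cases h : K i = k'
      · have : k' ≠ k := fun he => hkn (he ▸ hk')
        simp [h, this]
      · simp [h]
    rw [hmap]
    have hcov' : ∀ i ∈ bucket.filter (fun i => !(K i == k)), K i ∈ ks := by
      intro i hi
      simp only [List.mem_filter, Bool.not_eq_eq_eq_not, Bool.not_true, beq_eq_false_iff_ne] at hi
      have := hcov i hi.1
      simp only [List.mem_cons] at this
      rcases this with h | h
      · exact absurd h hi.2
      · exact h
    have := ih (bucket.filter (fun i => !(K i == k))) hks hcov'
    exact (this.append_left _).trans (List.filter_append_perm _ _)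

-- the second loop, over the key-sorted buckets
lemma pv_foldl_spec (cs : List Char) (f : Nat) (order : Int) (bucket : List Int)
    (ho : 1 ≤ order)
    (hb : ∀ i ∈ bucket, 0 ≤ i ∧ i.toNat < cs.length)
    (hnd : bucket.Nodup)
    (hIH : ∀ b' res, b'.Nodup → (∀ i ∈ b', 0 ≤ i ∧ i.toNat < cs.length) →
      (∃ i ∈ b', ∃ j ∈ b', i ≠ j ∧ pvKey cs order i = pvKey cs order j) →
      ∃ L, pvSortBucket cs f b' (order * 2) res = res ++ L ∧ L.Perm b' ∧
        L.Pairwise (fun a b => cs.drop a.toNat < cs.drop b.toNat)) :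
    ∀ (ks : List (List Char)) (res : List Int), ks.Pairwise (· < ·) →
      (∀ k ∈ ks, ∃ i ∈ bucket, pvKey cs order i = k) →
      ∃ L, ((ks.map (fun k => (k, pvGrp cs order bucket k))).foldl
          (fun result kv =>
            if kv.2.length > 1 then pvSortBucket cs f kv.2 (order * 2) result
            else result ++ [PySem.List.pyGetD kv.2 0 0]) res) = res ++ L
        ∧ L.Perm (ks.flatMap (pvGrp cs order bucket))
        ∧ L.Pairwise (fun a b => cs.drop a.toNat < cs.drop b.toNat) := by
  intro ks
  induction ks with
  | nil => intro res _ _; exact ⟨[], by simp, by simp, List.Pairwise.nil⟩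
  | cons k ks ih =>
    intro res hpw hcov
    obtain ⟨i0, hi0b, hi0k⟩ := hcov k (by simp)
    have hi0g : i0 ∈ pvGrp cs order bucket k := by
      simp [pvGrp, List.mem_filter, hi0b, hi0k]
    have hgmem : ∀ j ∈ pvGrp cs order bucket k, j ∈ bucket ∧ pvKey cs order j = k := by
      intro j hj
      simp only [pvGrp, List.mem_filter, beq_iff_eq] at hj
      exact hj
    simp only [List.map_cons, List.foldl_cons]
    -- one step: Lk is what this bucket contributes
    have hstep : ∃ Lk, (if (pvGrp cs order bucket k).length > 1
          then pvSortBucket cs f (pvGrp cs order bucket k) (order * 2) res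
          else res ++ [PySem.List.pyGetD (pvGrp cs order bucket k) 0 0]) = res ++ Lk
        ∧ Lk.Perm (pvGrp cs order bucket k)
        ∧ Lk.Pairwise (fun a b => cs.drop a.toNat < cs.drop b.toNat) := by
      by_cases hlen : (pvGrp cs order bucket k).length > 1
      · rw [if_pos hlen]
        have hnodup : (pvGrp cs order bucket k).Nodup := hnd.filter _
        have htwo : ∃ i ∈ pvGrp cs order bucket k, ∃ j ∈ pvGrp cs order bucket k,
            i ≠ j ∧ pvKey cs order i = pvKey cs order j := by
          have hex : ∃ x y t, pvGrp cs order bucket k = x :: y :: t := by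
            cases hg : pvGrp cs order bucket k with
            | nil => rw [hg] at hlen; simp at hlen
            | cons x rest =>
              cases rest with
              | nil => rw [hg] at hlen; simp at hlen
              | cons y t => exact ⟨x, y, t, rfl⟩
          obtain ⟨x, y, t, hg⟩ := hex
          refine ⟨x, by rw [hg]; simp, y, by rw [hg]; simp, ?_, ?_⟩
          · intro hxy
            rw [hg, hxy] at hnodup
            simp [List.nodup_cons] at hnodup
          · exact ((hgmem x (by rw [hg]; simp)).2).trans
              ((hgmem y (by rw [hg]; simp)).2).symm
        exact hIH _ res hnodup (fun i hi => hb i (hgmem i hi).1) htwo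
      · rw [if_neg hlen]
        match hg : pvGrp cs order bucket k with
        | [] => rw [hg] at hi0g; simp at hi0g
        | [x] => exact ⟨[x], by simp [pysem], by simp, by simp⟩
        | x :: y :: t => rw [hg] at hlen; simp at hlen
    obtain ⟨Lk, hLk, hLkperm, hLkpw⟩ := hstep
    rw [hLk]
    obtain ⟨L', hL', hperm', hpw'⟩ := ih (res ++ Lk) hpw.of_cons
      (fun k' hk' => hcov k' (by simp [hk']))
    refine ⟨Lk ++ L', by rw [hL', List.append_assoc], ?_, ?_⟩
    · rw [List.flatMap_cons]
      exact hLkperm.append hperm'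
    · rw [List.pairwise_append]
      refine ⟨hLkpw, hpw', ?_⟩
      intro a ha b hb'
      have hak : a ∈ pvGrp cs order bucket k := hLkperm.mem_iff.mp ha
      obtain ⟨hab, hakey⟩ := hgmem a hak
      have hbmem : b ∈ ks.flatMap (pvGrp cs order bucket) := hperm'.mem_iff.mp hb'
      rw [List.mem_flatMap] at hbmem
      obtain ⟨k', hk's, hbg⟩ := hbmem
      have hbk : b ∈ bucket ∧ pvKey cs order b = k' := by
        simpa [pvGrp, List.mem_filter] using hbg
      have hkk' : k < k' := (List.pairwise_cons.mp hpw).1 k' hk's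
      have ha0 := hb a hab
      have hb0 := hb b hbk.1
      apply pv_take_lt order.toNat
      rw [← pvKey_eq_take cs order a ha0.1 (by omega),
          ← pvKey_eq_take cs order b hb0.1 (by omega), hakey, hbk.2]
      exact hkk'
-- main invariant: with enough fuel, sort_bucket appends to `result` the indices of
-- `bucket` sorted by their full suffix
lemma pvSortBucket_spec (cs : List Char) :
    ∀ (fuel : Nat) (order : Int) (bucket res : List Int),
      1 ≤ order → bucket.Nodup → (∀ i ∈ bucket, 0 ≤ i ∧ i.toNat < cs.length) →
      1 ≤ fuel → cs.length ≤ order.toNat * 2 ^ (fuel - 1) →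
      ∃ L, pvSortBucket cs fuel bucket order res = res ++ L ∧ L.Perm bucket ∧
        L.Pairwise (fun a b => cs.drop a.toNat < cs.drop b.toNat) := by
  intro fuel
  induction fuel with
  | zero => intro _ _ _ _ _ _ hf _; omega
  | succ f ihf =>
    intro order bucket res ho hnd hb _ hinv
    have hrw : pvSortBucket cs (f + 1) bucket order res
        = ((@PySem.List.sorted _ (List Char) _ LinearOrder.toDecidableLT
              (PySem.Set.ofList (bucket.map (pvKey cs order))) (fun k => k) false).map
            (fun k => (k, pvGrp cs order bucket k))).foldl
          (fun result kv =>
            if kv.2.length > 1 then pvSortBucket cs f kv.2 (order * 2) result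
            else result ++ [PySem.List.pyGetD kv.2 0 0]) res := by
      show ((PySem.List.sorted (bucket.foldl (fun d i =>
              d.modify (PySem.List.slice cs (some i) (some (i + order))) [] (fun v => v ++ [i]))
              PySem.Dict.empty).items (fun kv => kv.1) false).foldl
            (fun result kv =>
              if kv.2.length > 1 then pvSortBucket cs f kv.2 (order * 2) result
              else result ++ [PySem.List.pyGetD kv.2 0 0]) res) = _
      rw [pv_dict_items, pv_sorted_congr _ LinearOrder.toDecidableLT, pv_sorted_items]
    rw [hrw]
    have hIH : ∀ b' res', b'.Nodup → (∀ i ∈ b', 0 ≤ i ∧ i.toNat < cs.length) →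
        (∃ i ∈ b', ∃ j ∈ b', i ≠ j ∧ pvKey cs order i = pvKey cs order j) →
        ∃ L, pvSortBucket cs f b' (order * 2) res' = res' ++ L ∧ L.Perm b' ∧
          L.Pairwise (fun a b => cs.drop a.toNat < cs.drop b.toNat) := by
      intro b' res' hnd' hb' ⟨i, hib, j, hjb, hij, hkeq⟩
      have hilt := hb' i hib
      have hjlt := hb' j hjb
      -- keys of width ≥ |cs| are the full suffixes, which are distinct: so order < |cs|
      have hord : order.toNat < cs.length := by
        by_contra hle
        rw [not_lt] at hle
        rw [pvKey_eq_take cs order i hilt.1 (by omega),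
            pvKey_eq_take cs order j hjlt.1 (by omega),
            List.take_of_length_le (by simp [List.length_drop]; omega),
            List.take_of_length_le (by simp [List.length_drop]; omega)] at hkeq
        exact pv_suffix_ne cs i j hilt.1 hilt.2 hjlt.1 hjlt.2 hij hkeq
      have hf1 : 1 ≤ f := by
        rcases Nat.eq_zero_or_pos f with h0 | h1
        · subst h0; simp at hinv; omega
        · exact h1
      have hinv' : cs.length ≤ (order * 2).toNat * 2 ^ (f - 1) := by
        have h2 : (order * 2).toNat = order.toNat * 2 := by omega
        have h3 : 2 ^ f = 2 ^ (f - 1) * 2 := by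
          rw [← pow_succ]
          congr 1
          omega
        rw [h2]
        calc cs.length ≤ order.toNat * 2 ^ f := by simpa using hinv
          _ = order.toNat * 2 * 2 ^ (f - 1) := by rw [h3]; ring
      exact ihf (order * 2) b' res' (by omega) hnd' hb' hf1 hinv'
    obtain ⟨L, hL, hperm, hpw⟩ := pv_foldl_spec cs f order bucket ho hb hnd hIH
      (@PySem.List.sorted _ (List Char) _ LinearOrder.toDecidableLT
        (PySem.Set.ofList (bucket.map (pvKey cs order))) (fun k => k) false) res
      (PySem.List.sorted_ofList_pairwise_lt (xs := bucket.map (pvKey cs order)))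
      (by
        intro k hk
        have : k ∈ PySem.Set.ofList (bucket.map (pvKey cs order)) :=
          (@PySem.List.sorted_perm _ _ _ LinearOrder.toDecidableLT _ _ _).mem_iff.mp hk
        rw [PySem.Set.mem_ofList, List.mem_map] at this
        obtain ⟨i, hib, hik⟩ := this
        exact ⟨i, hib, hik⟩)
    refine ⟨L, hL, ?_, hpw⟩
    have h1 : (((@PySem.List.sorted _ (List Char) _ LinearOrder.toDecidableLT
          (PySem.Set.ofList (bucket.map (pvKey cs order))) (fun k => k) false)).flatMap
            (pvGrp cs order bucket)).Perm
        ((PySem.Set.ofList (bucket.map (pvKey cs order))).flatMap (pvGrp cs order bucket)) :=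
      (@PySem.List.sorted_perm _ _ _ LinearOrder.toDecidableLT _ _ _).flatMap
        (fun _ _ => List.Perm.refl _)
    have h2 : ((PySem.Set.ofList (bucket.map (pvKey cs order))).flatMap
        (pvGrp cs order bucket)).Perm bucket := by
      apply pv_flatMap_perm (pvKey cs order) _ bucket (PySem.Set.nodup_ofList _)
      intro i hi
      rw [PySem.Set.mem_ofList]
      exact List.mem_map_of_mem hi
    exact (hperm.trans h1).trans h2

-- ===== VERDICT (by name: the statement is the Claim_ definition above) =====
theorem build_suffix_array_ManberMyers_spec : Claim_equal_build_suffix_array_ManberMyers := by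
  intro s _
  unfold Spec_build_suffix_array_ManberMyers build_suffix_array_ManberMyers
    build_suffix_array_ManberMyers_alt
  have hlen : PySem.Str.len s = (s.toList.length : Int) := by simp [pysem]
  obtain ⟨L, hL, hperm, hpw⟩ := pvSortBucket_spec s.toList (s.toList.length + 2) 1
    (PySem.List.pyRange 0 (PySem.Str.len s) 1) [] le_rfl
    (PySem.List.nodup_pyRange_one _ _)
    (by
      intro i hi
      rw [PySem.List.mem_pyRange_one, hlen] at hi
      constructor
      · exact hi.1
      · omega)
    (by omega)
    (by
      simp only [Int.toNat_one, one_mul]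
      exact le_of_lt (Nat.lt_two_pow_self.trans
        (Nat.pow_lt_pow_right (by omega) (by omega))))
  rw [hL]
  simp only [List.nil_append]
  rw [pv_sorted_congr _ LinearOrder.toDecidableLT]
  refine (PySem.List.sorted_eq_of_perm_of_pairwise_lt _ L _ hperm ?_).symm
  apply List.Pairwise.imp_of_mem ?_ hpw
  intro a b ha hb hab
  have ha' := hperm.subset ha
  have hb' := hperm.subset hb
  rw [PySem.List.mem_pyRange_one] at ha' hb'
  rw [PySem.List.slice_from _ ha'.1, PySem.List.slice_from _ hb'.1]
  exact hab
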